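-- pv_equiv track=rewrite | github.com/dmicloiu/weightedhotstuff | leaderRotation_impactAnalysis.py | generateAllPossibleLeaderRotations
-- ===== SOURCE A (Python) =====
-- def generateAllPossibleLeaderRotations(n, numberOfViews):
--     leaderRotations = []
--     for i in range(n):
--         leaderRotations.append([i])
--
--     for i in range(1, numberOfViews):
--         newLeaderRotations = []
--         for leaderRotation in leaderRotations:
--
--             for replicaID in range(n):
--                 if replicaID not in leaderRotation:
--                     newLeaderRotations.append(leaderRotation + [replicaID])
--
--         leaderRotations = newLeaderRotations
--
--     return leaderRotations
-- ===== SOURCE B (Python) =====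
-- def generateAllPossibleLeaderRotations(n, numberOfViews):
--     # Seed with each possible first leader, then extend by depth-first
--     # backtracking until the rotation has numberOfViews leaders.
--     rotations = []
--
--     def extend(rotation):
--         if len(rotation) >= numberOfViews:
--             rotations.append(rotation)
--             return
--         for replicaID in range(n):
--             if replicaID not in rotation:
--                 extend(rotation + [replicaID])
--
--     for firstLeader in range(n):
--         extend([firstLeader])
--     return rotations
-- ===== Notes on version B (the rewrite author's own statement) =====
-- stated objective: alternative
-- what changed: A builds every partial rotation level by level (BFS: rebuilds the whole frontier list numberOfViews-1 times); B seeds one rotation per first leader and extends each by depth-first backtracking until it has numberOfViews leaders, emitting complete rotations once in the same lexicographic order.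
import Mathlib
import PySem

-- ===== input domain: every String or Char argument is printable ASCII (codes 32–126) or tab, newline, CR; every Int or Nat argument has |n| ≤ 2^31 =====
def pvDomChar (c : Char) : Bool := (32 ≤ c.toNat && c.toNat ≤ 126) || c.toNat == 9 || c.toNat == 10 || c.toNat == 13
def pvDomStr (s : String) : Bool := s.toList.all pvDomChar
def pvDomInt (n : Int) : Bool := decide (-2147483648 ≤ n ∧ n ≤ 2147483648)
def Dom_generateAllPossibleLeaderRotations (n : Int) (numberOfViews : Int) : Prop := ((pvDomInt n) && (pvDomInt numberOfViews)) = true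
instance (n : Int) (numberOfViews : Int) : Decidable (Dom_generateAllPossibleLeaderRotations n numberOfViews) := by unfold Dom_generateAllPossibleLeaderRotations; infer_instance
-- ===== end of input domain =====

-- B replaces A's level-by-level BFS (rebuild the whole list of partial rotations numberOfViews-1
-- times) by a depth-first backtracking extension of each seeded first leader, same output order.


-- ===== PORT A =====
def generateAllPossibleLeaderRotations (n : Int) (numberOfViews : Int) : List (List Int) :=
  -- for i in range(n): leaderRotations.append([i])
  let leaderRotations :=
    (PySem.List.pyRange 0 n 1).foldl (fun acc i => acc ++ [[i]]) []
  -- for i in range(1, numberOfViews): rebuild leaderRotations one view longer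
  (PySem.List.pyRange 1 numberOfViews 1).foldl
    (fun lrs _i =>
      lrs.foldl
        (fun newLRs lr =>
          (PySem.List.pyRange 0 n 1).foldl
            (fun nn r => if r ∈ lr then nn else nn ++ [lr ++ [r]]) newLRs)
        [])
    leaderRotations

-- ===== PORT B =====
-- extend(rotation): the recursion stops when len(rotation) >= numberOfViews; the fuel
-- (numberOfViews - len(rotation)).toNat is exactly that test, decreasing by 1 per call
def pvExtend (n : Int) (rotation : List Int) : Nat → List (List Int)
  | 0 => [rotation]
  | rem + 1 =>
    (PySem.List.pyRange 0 n 1).foldl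
      (fun acc r => if r ∈ rotation then acc else acc ++ pvExtend n (rotation ++ [r]) rem) []

def generateAllPossibleLeaderRotations_alt (n : Int) (numberOfViews : Int) : List (List Int) :=
  -- for firstLeader in range(n): extend([firstLeader])
  (PySem.List.pyRange 0 n 1).foldl
    (fun acc i => acc ++ pvExtend n [i] (numberOfViews - 1).toNat) []

-- ===== PRECONDITION & SPEC =====
def Spec_generateAllPossibleLeaderRotations (n : Int) (numberOfViews : Int) (out : List (List Int)) : Prop := out = generateAllPossibleLeaderRotations_alt n numberOfViews
instance (n : Int) (numberOfViews : Int) (out : List (List Int)) : Decidable (Spec_generateAllPossibleLeaderRotations n numberOfViews out) := by unfold Spec_generateAllPossibleLeaderRotations; infer_instance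

-- ===== CLAIM (what is proved, stated in full; the proofs are below) =====
def Claim_equal_generateAllPossibleLeaderRotations : Prop := ∀ (n : Int) (numberOfViews : Int), Dom_generateAllPossibleLeaderRotations n numberOfViews → Spec_generateAllPossibleLeaderRotations n numberOfViews (generateAllPossibleLeaderRotations n numberOfViews)

-- ===== LEMMAS AND PROOFS =====

-- the one-step extensions of a partial rotation, in ascending replica order
def pvExt (n : Int) (lr : List Int) : List (List Int) :=
  ((PySem.List.pyRange 0 n 1).filter (fun r => !decide (r ∈ lr))).map (fun r => lr ++ [r])

theorem pvInner_eq (n : Int) (lr : List Int) (acc : List (List Int)) :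
    (PySem.List.pyRange 0 n 1).foldl
      (fun nn r => if r ∈ lr then nn else nn ++ [lr ++ [r]]) acc = acc ++ pvExt n lr := by
  have h : (fun (nn : List (List Int)) (r : Int) => if r ∈ lr then nn else nn ++ [lr ++ [r]])
      = (fun nn r => if (fun r => !decide (r ∈ lr)) r = true then nn ++ [lr ++ [r]] else nn) := by
    funext nn r; by_cases hr : r ∈ lr <;> simp [hr]
  rw [h, PySem.List.foldl_append_if]
  rfl

theorem pvStep_eq (n : Int) (lrs : List (List Int)) :
    lrs.foldl
      (fun newLRs lr =>
        (PySem.List.pyRange 0 n 1).foldl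
          (fun nn r => if r ∈ lr then nn else nn ++ [lr ++ [r]]) newLRs)
      [] = lrs.flatMap (pvExt n) := by
  have h : (fun (newLRs : List (List Int)) (lr : List Int) =>
      (PySem.List.pyRange 0 n 1).foldl
        (fun nn r => if r ∈ lr then nn else nn ++ [lr ++ [r]]) newLRs)
      = fun newLRs lr => newLRs ++ pvExt n lr := by
    funext newLRs lr; exact pvInner_eq n lr newLRs
  rw [h, PySem.List.foldl_append_eq_flatMap]
  rfl

-- a flatMap that skips via 'if … then [] else' is a flatMap over the filtered list
theorem pvFlatMap_if (p : Int → Prop) [DecidablePred p] (f : Int → List (List Int)) :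
    ∀ l : List Int,
      l.flatMap (fun r => if p r then [] else f r)
        = (l.filter (fun r => !decide (p r))).flatMap f := by
  intro l
  induction l with
  | nil => rfl
  | cons x xs ih =>
      by_cases hx : p x <;> simp [List.flatMap_cons, hx, ih]

theorem pvExtend_succ (n : Int) (pre : List Int) (rem : Nat) :
    pvExtend n pre (rem + 1) = (pvExt n pre).flatMap (fun q => pvExtend n q rem) := by
  have h : (fun (acc : List (List Int)) (r : Int) =>
      if r ∈ pre then acc else acc ++ pvExtend n (pre ++ [r]) rem)
      = fun acc r => acc ++ (if r ∈ pre then [] else pvExtend n (pre ++ [r]) rem) := by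
    funext acc r; by_cases hr : r ∈ pre <;> simp [hr]
  show (PySem.List.pyRange 0 n 1).foldl _ [] = _
  rw [h, PySem.List.foldl_append_eq_flatMap, List.nil_append,
      pvFlatMap_if (fun r => r ∈ pre), pvExt, List.flatMap_map]

-- a foldl that ignores the list elements only counts them
theorem pvFoldl_const {α β : Type} (f : β → β) :
    ∀ (l : List α) (s : β), l.foldl (fun acc _ => f acc) s = f^[l.length] s := by
  intro l
  induction l with
  | nil => intro s; rfl
  | cons x xs ih => intro s; simp [List.foldl_cons, ih, Function.iterate_succ_apply]

-- the BFS invariant: iterating the level step from any frontier = flatMap of the DFS extension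
theorem pvIter_eq (n : Int) :
    ∀ (rem : Nat) (lrs : List (List Int)),
      (fun frontier => frontier.flatMap (pvExt n))^[rem] lrs
        = lrs.flatMap (fun p => pvExtend n p rem) := by
  intro rem
  induction rem with
  | zero => intro lrs; simp [pvExtend]
  | succ m ih =>
      intro lrs
      rw [Function.iterate_succ_apply, ih]
      simp only [List.flatMap_assoc]
      refine List.flatMap_congr (fun p _ => ?_)
      exact (pvExtend_succ n p m).symm

theorem pvLen_pyRange_one (a b : Int) : (PySem.List.pyRange a b 1).length = (b - a).toNat := by
  simp [pysem]

-- ===== VERDICT (by name: the statement is the Claim_ definition above) =====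
theorem generateAllPossibleLeaderRotations_spec : Claim_equal_generateAllPossibleLeaderRotations := by
  intro n k _
  show generateAllPossibleLeaderRotations n k = generateAllPossibleLeaderRotations_alt n k
  unfold generateAllPossibleLeaderRotations generateAllPossibleLeaderRotations_alt
  rw [PySem.List.foldl_append_singleton_eq_map (fun i => [i]), List.nil_append]
  have hstep : (fun (lrs : List (List Int)) (_i : Int) =>
      lrs.foldl
        (fun newLRs lr =>
          (PySem.List.pyRange 0 n 1).foldl
            (fun nn r => if r ∈ lr then nn else nn ++ [lr ++ [r]]) newLRs)
        []) = fun lrs _i => lrs.flatMap (pvExt n) := by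
    funext lrs _i; exact pvStep_eq n lrs
  rw [hstep, pvFoldl_const, pvLen_pyRange_one, pvIter_eq,
      PySem.List.foldl_append_eq_flatMap, List.nil_append, List.flatMap_map]
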